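-- pv_equiv track=rewrite | github.com/echeadle/Py_Secret_Agent | 03_Chp/stegano_ex1.py | byte_sequence
-- ===== SOURCE A (Python) =====
-- def to_byte( b ):
--     v= 0
--     for bit in b:
--         v = (v<<1)|bit
--     return v
--
-- def byte_sequence( bits ):
--     byte= []
--     for n, b in enumerate(bits):
--         if n%8 == 0 and n != 0:
--             yield to_byte(byte)
--             byte= []
--         byte.append( b )
--     yield to_byte(byte)
-- ===== SOURCE B (Python) =====
-- def byte_sequence(bits):
--     v = 0
--     n = 0
--     for bit in bits:
--         if n % 8 == 0 and n != 0:
--             yield v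
--             v = 0
--         v = (v << 1) | bit
--         n += 1
--     yield v
-- ===== Notes on version B (the rewrite author's own statement) =====
-- stated objective: simpler
-- what changed: Replaced A's two-phase design (accumulate a list of bits per group, then fold it with the to_byte helper) by a single streaming pass that maintains a running integer accumulator and a counter, with no helper and no intermediate list.
import Mathlib
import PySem

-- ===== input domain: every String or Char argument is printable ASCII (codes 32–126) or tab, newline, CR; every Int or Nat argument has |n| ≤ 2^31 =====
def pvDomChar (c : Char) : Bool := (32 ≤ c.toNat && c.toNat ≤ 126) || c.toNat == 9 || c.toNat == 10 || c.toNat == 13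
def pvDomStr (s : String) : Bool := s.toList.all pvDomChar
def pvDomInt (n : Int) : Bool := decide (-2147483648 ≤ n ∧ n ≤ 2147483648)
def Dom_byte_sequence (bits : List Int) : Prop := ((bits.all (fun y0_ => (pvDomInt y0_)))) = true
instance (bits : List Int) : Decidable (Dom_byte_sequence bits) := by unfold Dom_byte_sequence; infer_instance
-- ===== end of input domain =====

-- B collapses A's per-group bit list + to_byte fold into one streaming pass with a running accumulator (simpler).


-- ===== PORT A =====
def to_byte (b : List Int) : Int :=
  b.foldl (fun v bit => PySem.Int.bor (v <<< 1) bit) 0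

def byte_sequence (bits : List Int) : List Int :=
  let st := (PySem.List.enumerate bits 0).foldl
    (fun (st : List Int × List Int) nb =>
      let out := st.1
      let byte := st.2
      let n := nb.1
      let b := nb.2
      if PySem.Int.mod n 8 == 0 && n != 0 then
        (out ++ [to_byte byte], [b])
      else
        (out, byte ++ [b]))
    ([], [])
  st.1 ++ [to_byte st.2]

-- ===== PORT B =====
def byte_sequence_alt (bits : List Int) : List Int :=
  let st := bits.foldl
    (fun (st : List Int × Int × Int) bit =>
      let out := st.1
      let v := st.2.1
      let n := st.2.2
      let ov := if PySem.Int.mod n 8 == 0 && n != 0 then (out ++ [v], (0 : Int)) else (out, v)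
      (ov.1, PySem.Int.bor (ov.2 <<< 1) bit, n + 1))
    ([], 0, 0)
  st.1 ++ [st.2.1]

-- ===== PRECONDITION & SPEC =====
def Spec_byte_sequence (bits : List Int) (out : List Int) : Prop := out = byte_sequence_alt bits
instance (bits : List Int) (out : List Int) : Decidable (Spec_byte_sequence bits out) := by unfold Spec_byte_sequence; infer_instance

-- ===== CLAIM (what is proved, stated in full; the proofs are below) =====
def Claim_equal_byte_sequence : Prop := ∀ (bits : List Int), Dom_byte_sequence bits → Spec_byte_sequence bits (byte_sequence bits)

-- ===== LEMMAS AND PROOFS =====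

theorem to_byte_append (byte : List Int) (b : Int) :
    to_byte (byte ++ [b]) = PySem.Int.bor (to_byte byte <<< 1) b := by
  simp [to_byte, List.foldl_append]

/-- Invariant relating A's fold state (output list, current bit group) to B's
    fold state (output list, running accumulator, counter). -/
theorem fold_invariant (bits : List Int) :
    ∀ (s : Int) (out byte : List Int) (v : Int), to_byte byte = v →
    (((PySem.List.enumerate bits s).foldl
        (fun (st : List Int × List Int) nb =>
          let out := st.1
          let byte := st.2
          let n := nb.1
          let b := nb.2
          if PySem.Int.mod n 8 == 0 && n != 0 then
            (out ++ [to_byte byte], [b])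
          else
            (out, byte ++ [b]))
        (out, byte)).1
      = (bits.foldl
          (fun (st : List Int × Int × Int) bit =>
            let out := st.1
            let v := st.2.1
            let n := st.2.2
            let ov := if PySem.Int.mod n 8 == 0 && n != 0 then (out ++ [v], (0 : Int)) else (out, v)
            (ov.1, PySem.Int.bor (ov.2 <<< 1) bit, n + 1))
          (out, v, s)).1)
    ∧ (to_byte ((PySem.List.enumerate bits s).foldl
        (fun (st : List Int × List Int) nb =>
          let out := st.1
          let byte := st.2
          let n := nb.1
          let b := nb.2
          if PySem.Int.mod n 8 == 0 && n != 0 then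
            (out ++ [to_byte byte], [b])
          else
            (out, byte ++ [b]))
        (out, byte)).2
      = (bits.foldl
          (fun (st : List Int × Int × Int) bit =>
            let out := st.1
            let v := st.2.1
            let n := st.2.2
            let ov := if PySem.Int.mod n 8 == 0 && n != 0 then (out ++ [v], (0 : Int)) else (out, v)
            (ov.1, PySem.Int.bor (ov.2 <<< 1) bit, n + 1))
          (out, v, s)).2.1) := by
  induction bits with
  | nil => intro s out byte v hv; simp [PySem.List.enumerate, hv]
  | cons b rest ih =>
    intro s out byte v hv
    rw [PySem.List.enumerate_cons]
    by_cases h : 8 ∣ s ∧ ¬s = 0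
    · simpa [List.foldl_cons, h, hv] using
        ih (s + 1) (out ++ [v]) [b] (PySem.Int.bor ((0 : Int) <<< 1) b)
          (by simp [to_byte])
    · simpa [List.foldl_cons, h, hv] using
        ih (s + 1) out (byte ++ [b]) (PySem.Int.bor (v <<< 1) b)
          (by rw [to_byte_append, hv])

-- ===== VERDICT (by name: the statement is the Claim_ definition above) =====
theorem byte_sequence_spec : Claim_equal_byte_sequence := by
  intro bits _
  have h := fold_invariant bits 0 [] [] 0 (by simp [to_byte])
  simp only [Spec_byte_sequence, byte_sequence, byte_sequence_alt]
  rw [h.1, h.2]
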